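-- pv_equiv track=rewrite | github.com/Tovarissh/smtpsender | core/hidden_text.py | _in_tag_range
-- ===== SOURCE A (Python) =====
-- from typing import List, Tuple
--
-- def _in_tag_range(pos: int, tag_ranges: List[Tuple[int, int]]) -> bool:
--     """二分判断 pos 是否落在某个标签区间内。"""
--     lo, hi = 0, len(tag_ranges) - 1
--     while lo <= hi:
--         mid = (lo + hi) // 2
--         s, e = tag_ranges[mid]
--         if pos < s:
--             hi = mid - 1
--         elif pos >= e:
--             lo = mid + 1
--         else:
--             return True
--     return False
-- ===== SOURCE B (Python) =====
-- from typing import List, Tuple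
--
-- def _in_tag_range(pos: int, tag_ranges: List[Tuple[int, int]]) -> bool:
--     """Divide-and-conquer on the list itself: same midpoint comparisons, recursive."""
--     if not tag_ranges:
--         return False
--     mid = (len(tag_ranges) - 1) // 2
--     s, e = tag_ranges[mid]
--     if pos < s:
--         return _in_tag_range(pos, tag_ranges[:mid])
--     if pos >= e:
--         return _in_tag_range(pos, tag_ranges[mid + 1:])
--     return True
-- ===== Notes on version B (the rewrite author's own statement) =====
-- stated objective: alternative
-- what changed: Replaced the iterative lo/hi index loop with a divide-and-conquer recursion on the list itself (slice off the half not searched), keeping the exact midpoint (len-1)//2 and boundary comparisons.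
import Mathlib
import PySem

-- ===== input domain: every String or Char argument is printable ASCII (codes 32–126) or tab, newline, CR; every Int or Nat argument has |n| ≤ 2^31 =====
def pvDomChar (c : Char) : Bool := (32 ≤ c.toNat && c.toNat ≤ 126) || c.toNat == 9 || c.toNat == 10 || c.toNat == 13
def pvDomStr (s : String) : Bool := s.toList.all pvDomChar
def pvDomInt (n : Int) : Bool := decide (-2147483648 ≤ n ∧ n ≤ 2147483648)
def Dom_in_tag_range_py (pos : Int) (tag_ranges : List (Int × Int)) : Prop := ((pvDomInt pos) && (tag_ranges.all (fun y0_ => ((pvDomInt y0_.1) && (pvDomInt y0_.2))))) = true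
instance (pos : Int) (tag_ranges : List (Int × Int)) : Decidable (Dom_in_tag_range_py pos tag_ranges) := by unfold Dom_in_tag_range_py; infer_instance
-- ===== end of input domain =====

-- ===== PORT A =====
-- B restates A's binary search as divide-and-conquer recursion on the list (slicing),
-- same midpoint and comparisons; equivalence of the return values is proved (no mutation involved).

-- the while-loop of A over state (lo, hi)
def inTagLoopA (pos : Int) (tag_ranges : List (Int × Int)) (lo hi : Int) : Bool :=
  if h : lo ≤ hi then
    let mid := PySem.Int.floordiv (lo + hi) 2
    match PySem.List.pyGet? tag_ranges mid with
    | none => false  -- unreachable from in_tag_range_py's initial state (Python would raise)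
    | some (s, e) =>
      if pos < s then inTagLoopA pos tag_ranges lo (mid - 1)
      else if pos ≥ e then inTagLoopA pos tag_ranges (mid + 1) hi
      else true
  else false
termination_by (hi + 1 - lo).toNat
decreasing_by
  · have := PySem.Int.floordiv_two_mid_bounds h
    omega
  · have := PySem.Int.floordiv_two_mid_bounds h
    omega

def in_tag_range_py (pos : Int) (tag_ranges : List (Int × Int)) : Bool :=
  inTagLoopA pos tag_ranges 0 ((tag_ranges.length : Int) - 1)

-- ===== PORT B =====
def in_tag_range_py_alt (pos : Int) (tag_ranges : List (Int × Int)) : Bool :=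
  if hne : tag_ranges.isEmpty then false
  else
    let mid : Nat := (tag_ranges.length - 1) / 2
    let se := tag_ranges.getD mid (0, 0)
    if pos < se.1 then in_tag_range_py_alt pos (tag_ranges.take mid)
    else if pos ≥ se.2 then in_tag_range_py_alt pos (tag_ranges.drop (mid + 1))
    else true
termination_by tag_ranges.length
decreasing_by
  all_goals
    have h0 : tag_ranges ≠ [] := by simpa [List.isEmpty_iff] using hne
    have h1 : 0 < tag_ranges.length := List.length_pos_iff.mpr h0
    simp only [List.length_take, List.length_drop]
    omega

-- ===== PRECONDITION & SPEC =====
def Spec_in_tag_range_py (pos : Int) (tag_ranges : List (Int × Int)) (out : Bool) : Prop := out = in_tag_range_py_alt pos tag_ranges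
instance (pos : Int) (tag_ranges : List (Int × Int)) (out : Bool) : Decidable (Spec_in_tag_range_py pos tag_ranges out) := by unfold Spec_in_tag_range_py; infer_instance

-- ===== CLAIM (what is proved, stated in full; the proofs are below) =====
def Claim_equal_in_tag_range_py : Prop := ∀ (pos : Int) (tag_ranges : List (Int × Int)), Dom_in_tag_range_py pos tag_ranges → Spec_in_tag_range_py pos tag_ranges (in_tag_range_py pos tag_ranges)

-- ===== LEMMAS AND PROOFS =====

-- one unfolding step of B's recursion on a nonempty list
lemma alt_unfold (pos : Int) (ys : List (Int × Int)) (hne : ys ≠ []) :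
    in_tag_range_py_alt pos ys =
      (if pos < (ys.getD ((ys.length - 1) / 2) (0, 0)).1 then
        in_tag_range_py_alt pos (ys.take ((ys.length - 1) / 2))
      else if pos ≥ (ys.getD ((ys.length - 1) / 2) (0, 0)).2 then
        in_tag_range_py_alt pos (ys.drop ((ys.length - 1) / 2 + 1))
      else true) := by
  rw [in_tag_range_py_alt]
  simp [List.isEmpty_iff, hne]

-- A's loop from state (lo, hi) computes B's recursion on the sublist xs[lo .. hi]
lemma loop_eq_alt (pos : Int) :
    ∀ (fuel : Nat) (xs : List (Int × Int)) (lo hi : Int),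
      0 ≤ lo → hi < (xs.length : Int) → (hi + 1 - lo).toNat ≤ fuel →
      inTagLoopA pos xs lo hi =
        in_tag_range_py_alt pos ((xs.drop lo.toNat).take (hi + 1 - lo).toNat) := by
  intro fuel
  induction fuel with
  | zero =>
      intro xs lo hi hlo hhi hf
      rw [inTagLoopA, in_tag_range_py_alt]
      have hn : (hi + 1 - lo).toNat = 0 := by omega
      simp [hn, show ¬ lo ≤ hi by omega]
  | succ fuel ih =>
      intro xs lo hi hlo hhi hf
      by_cases hle : lo ≤ hi
      · have hM2 : PySem.Int.floordiv (lo + hi) 2 = (lo + hi) / 2 :=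
          PySem.Int.floordiv_eq_ediv_of_pos (by omega)
        have hMlo : lo ≤ (lo + hi) / 2 := hM2 ▸ (PySem.Int.floordiv_two_mid_bounds hle).1
        have hMhi : (lo + hi) / 2 ≤ hi := hM2 ▸ (PySem.Int.floordiv_two_mid_bounds hle).2
        have hM0 : 0 ≤ (lo + hi) / 2 := le_trans hlo hMlo
        have hMlen : (lo + hi) / 2 < (xs.length : Int) := lt_of_le_of_lt hMhi hhi
        rw [inTagLoopA]
        simp only [dif_pos hle, hM2,
          PySem.List.pyGet?_eq_some_getElem xs hM0 hMlen, List.get_eq_getElem]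
        -- the segment B recurses on
        have hlen : ((xs.drop lo.toNat).take (hi + 1 - lo).toNat).length
            = (hi + 1 - lo).toNat := by
          simp; omega
        have hsegne : (xs.drop lo.toNat).take (hi + 1 - lo).toNat ≠ [] := by
          intro hc
          rw [hc] at hlen
          simp at hlen
          omega
        rw [alt_unfold pos _ hsegne, hlen]
        have hidx : lo.toNat + (((hi + 1 - lo).toNat - 1) / 2)
            = ((lo + hi) / 2).toNat := by omega
        have hget : ((xs.drop lo.toNat).take (hi + 1 - lo).toNat).getD
              (((hi + 1 - lo).toNat - 1) / 2) (0, 0)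
            = xs[((lo + hi) / 2).toNat]'(by omega) := by
          rw [List.getD_eq_getElem?_getD, List.getElem?_take, List.getElem?_drop]
          rw [if_pos (by omega), hidx, List.getElem?_eq_getElem (by omega)]
          rfl
        rw [hget]
        by_cases h1 : pos < (xs[((lo + hi) / 2).toNat]'(by omega)).1
        · rw [if_pos h1, if_pos h1]
          rw [ih xs lo ((lo + hi) / 2 - 1) hlo (by omega) (by omega)]
          congr 1
          rw [List.take_take]
          congr 1
          omega
        · rw [if_neg h1, if_neg h1]
          by_cases h2 : pos ≥ (xs[((lo + hi) / 2).toNat]'(by omega)).2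
          · rw [if_pos h2, if_pos h2]
            rw [ih xs ((lo + hi) / 2 + 1) hi (by omega) hhi (by omega)]
            rw [List.drop_take, List.drop_drop]
            have e1 : (hi + 1 - lo).toNat - (((hi + 1 - lo).toNat - 1) / 2 + 1)
                = (hi + 1 - ((lo + hi) / 2 + 1)).toNat := by omega
            have e2 : lo.toNat + (((hi + 1 - lo).toNat - 1) / 2 + 1)
                = ((lo + hi) / 2 + 1).toNat := by omega
            rw [e1, e2]
          · rw [if_neg h2, if_neg h2]
      · rw [inTagLoopA, in_tag_range_py_alt]
        have hn : (hi + 1 - lo).toNat = 0 := by omega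
        simp [hn, hle]

-- ===== VERDICT (by name: the statement is the Claim_ definition above) =====
theorem in_tag_range_py_spec : Claim_equal_in_tag_range_py := by
  intro pos xs _
  unfold Spec_in_tag_range_py in_tag_range_py
  rw [loop_eq_alt pos ((xs.length : Int) - 1 + 1 - 0).toNat xs 0 ((xs.length : Int) - 1)
      le_rfl (by omega) le_rfl]
  congr 1
  simp
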